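-- pv_equiv track=rewrite | github.com/LukachuPro88/Passworder | passworder/passworder.py | _avoid_repeats
-- ===== SOURCE A (Python) =====
-- def _avoid_repeats(password:str,max_repeat:int=3) -> bool:
--     count = 1
--     for i in range(1, len(password)):
--         if password[i] == password[i - 1]:
--             count += 1
--             if count > max_repeat:
--                 return False
--         else:
--             count = 1
--     return True
-- ===== SOURCE B (Python) =====
-- def _avoid_repeats(password: str, max_repeat: int = 3) -> bool:
--     # Decompose the password into maximal runs of identical characters,
--     # then check every run length against the bound (a lone character is
--     # always fine, so the effective bound is at least 1).
--     runs = []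
--     i = 0
--     n = len(password)
--     while i < n:
--         j = i
--         while j < n and password[j] == password[i]:
--             j += 1
--         runs.append(j - i)
--         i = j
--     limit = max(max_repeat, 1)
--     return all(length <= limit for length in runs)
-- ===== Notes on version B (the rewrite author's own statement) =====
-- stated objective: alternative
-- what changed: B first materialises the list of maximal run lengths (two-level scan, no early return, no running counter) and then checks each length against max(max_repeat,1), instead of A's single pass with a consecutive counter and early exit.
import Mathlib
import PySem

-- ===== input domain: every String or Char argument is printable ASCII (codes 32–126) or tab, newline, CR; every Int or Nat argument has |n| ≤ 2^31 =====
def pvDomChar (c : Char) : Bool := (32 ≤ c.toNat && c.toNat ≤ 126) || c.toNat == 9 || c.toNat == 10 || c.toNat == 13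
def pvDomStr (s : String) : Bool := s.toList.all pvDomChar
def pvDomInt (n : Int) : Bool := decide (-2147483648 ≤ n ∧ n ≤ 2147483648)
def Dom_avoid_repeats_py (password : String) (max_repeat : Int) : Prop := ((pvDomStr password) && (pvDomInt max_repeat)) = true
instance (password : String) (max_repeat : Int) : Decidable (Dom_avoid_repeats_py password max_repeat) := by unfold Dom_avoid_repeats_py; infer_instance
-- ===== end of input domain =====

-- B decomposes the password into maximal run lengths and checks each against max(max_repeat,1),
-- instead of A's single counter pass with early exit; alternative decomposition, same value everywhere.


-- ===== PORT A =====
-- the for-loop over i in range(1, len): `prev` is password[i-1], `rest` the chars from i on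
def pvLoopA (max_repeat : Int) (prev : Char) (rest : List Char) (count : Int) : Bool :=
  match rest with
  | [] => true
  | c :: cs =>
    if c == prev then
      if count + 1 > max_repeat then false
      else pvLoopA max_repeat c cs (count + 1)
    else pvLoopA max_repeat c cs 1

def avoid_repeats_py (password : String) (max_repeat : Int) : Bool :=
  match password.toList with
  | [] => true
  | c :: cs => pvLoopA max_repeat c cs 1

-- ===== PORT B =====
-- the outer while-loop of Source B: the inner while advancing j is the takeWhile/dropWhile split
def pvRunsB : List Char → List Nat
  | [] => []
  | c :: cs =>
    (1 + (cs.takeWhile (fun d => d == c)).length) :: pvRunsB (cs.dropWhile (fun d => d == c))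
termination_by l => l.length
decreasing_by
  simpa using Nat.lt_succ_of_le (List.length_dropWhile_le _ _)

def avoid_repeats_py_alt (password : String) (max_repeat : Int) : Bool :=
  (pvRunsB password.toList).all (fun L => decide ((L : Int) ≤ max max_repeat 1))

-- ===== PRECONDITION & SPEC =====
def Spec_avoid_repeats_py (password : String) (max_repeat : Int) (out : Bool) : Prop := out = avoid_repeats_py_alt password max_repeat
instance (password : String) (max_repeat : Int) (out : Bool) : Decidable (Spec_avoid_repeats_py password max_repeat out) := by unfold Spec_avoid_repeats_py; infer_instance

-- ===== CLAIM (what is proved, stated in full; the proofs are below) =====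
def Claim_equal_avoid_repeats_py : Prop := ∀ (password : String) (max_repeat : Int), Dom_avoid_repeats_py password max_repeat → Spec_avoid_repeats_py password max_repeat (avoid_repeats_py password max_repeat)

-- ===== LEMMAS AND PROOFS =====

-- the head-run check of B: length 1+len is within max(max_repeat,1) iff A's fresh counter survives it
theorem pvHeadRunIff (max_repeat : Int) (tw : List Char) :
    ((1 : Int) + (tw.length : Int) ≤ max_repeat ∨ tw = []) ↔
      (((1 + tw.length : Nat) : Int) ≤ max max_repeat 1) := by
  by_cases hemp : tw = []
  · simp [hemp]
  · have hlen : tw.length ≠ 0 := by simpa [List.length_eq_zero_iff] using hemp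
    simp only [hemp, or_false]
    push_cast
    omega

-- Characterisation of A's loop: it scans the current run of `prev` (failing iff the counter
-- would exceed max_repeat inside it) and then restarts freshly on the rest.
theorem pvLoopA_eq (max_repeat : Int) :
    ∀ (cs : List Char) (c : Char) (count : Int),
      pvLoopA max_repeat c cs count =
        ((decide (count + ((cs.takeWhile (fun d => d == c)).length : Int) ≤ max_repeat
            ∨ cs.takeWhile (fun d => d == c) = []))
         && (pvRunsB (cs.dropWhile (fun d => d == c))).all
              (fun L => decide ((L : Int) ≤ max max_repeat 1))) := by
  intro cs
  induction cs with
  | nil => intro c count; simp [pvLoopA, pvRunsB]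
  | cons d ds ih =>
    intro c count
    by_cases hdc : d = c
    · subst hdc
      have hp : ((d == d) = true) := beq_self_eq_true d
      rw [pvLoopA, if_pos hp, List.takeWhile_cons_of_pos (p := fun e => e == d) hp, List.dropWhile_cons_of_pos (p := fun e => e == d) hp]
      by_cases hover : count + 1 > max_repeat
      · rw [if_pos hover]
        have hfalse : ¬ (count + (((d :: ds.takeWhile (fun e => e == d)).length : Nat) : Int) ≤ max_repeat
            ∨ (d :: ds.takeWhile (fun e => e == d)) = []) := by
          push Not
          refine ⟨?_, by simp⟩
          simp only [List.length_cons]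
          push_cast
          omega
        rw [decide_eq_false hfalse]
        simp
      · rw [if_neg hover, ih d (count + 1)]
        congr 1
        rw [decide_eq_decide]
        by_cases hemp : ds.takeWhile (fun e => e == d) = []
        · simp [hemp]
          omega
        · have hlen : (ds.takeWhile (fun e => e == d)).length ≠ 0 := by
            simpa [List.length_eq_zero_iff] using hemp
          simp only [hemp, List.cons_ne_nil, or_false, List.length_cons]
          push_cast
          omega
    · have hn : ¬ ((d == c) = true) := by simp [hdc]
      have hnf : ((d == c) = false) := by simp [hdc]
      rw [pvLoopA, if_neg hn, List.takeWhile_cons_of_neg (p := fun e => e == c) (by simp [hnf]),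
        List.dropWhile_cons_of_neg (p := fun e => e == c) (by simp [hnf])]
      have htriv : decide (count + (([] : List Char).length : Int) ≤ max_repeat
          ∨ ([] : List Char) = []) = true := by simp
      rw [htriv, Bool.true_and, pvRunsB, List.all_cons, ih d 1]
      congr 1
      rw [decide_eq_decide]
      exact pvHeadRunIff max_repeat _

-- ===== VERDICT (by name: the statement is the Claim_ definition above) =====
theorem avoid_repeats_py_spec : Claim_equal_avoid_repeats_py := by
  intro password max_repeat _
  unfold Spec_avoid_repeats_py avoid_repeats_py avoid_repeats_py_alt
  cases h : password.toList with
  | nil => simp [pvRunsB]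
  | cons c cs =>
    show pvLoopA max_repeat c cs 1 = _
    rw [pvLoopA_eq, pvRunsB, List.all_cons]
    congr 1
    rw [decide_eq_decide]
    exact pvHeadRunIff max_repeat _
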